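-- pv_equiv track=rewrite | github.com/rutvi105/ai-agent-mvp | search_service/main.py | _get_mock_results
-- ===== SOURCE A (Python) =====
-- from typing import List, Dict, Any
--
-- def _get_mock_results(query: str) -> List[Dict[str, Any]]:
--     """
--     Generate mock search results for demonstration purposes
--     This simulates web search results when actual search fails
--     """
--     mock_results = []
--
--     # AI-related mock results
--     ai_keywords = ['ai', 'artificial intelligence', 'machine learning', 'deep learning', 'neural network']
--     tech_keywords = ['programming', 'coding', 'software', 'development', 'computer']
--     science_keywords = ['science', 'research', 'technology', 'innovation']
--
--     query_lower = query.lower()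
--
--     if any(keyword in query_lower for keyword in ai_keywords):
--         mock_results = [
--             {
--                 'title': f'Understanding {query.title()}: A Comprehensive Guide',
--                 'snippet': f'Learn about {query} and its applications in modern technology. This comprehensive guide covers the fundamentals, applications, and future prospects of {query}.',
--                 'url': f'https://example.com/guide-to-{query.replace(" ", "-").lower()}',
--                 'source': 'Mock Search Result'
--             },
--             {
--                 'title': f'{query.title()} in 2024: Latest Trends and Developments',
--                 'snippet': f'Explore the latest trends in {query}. Industry experts share insights about current developments and future directions in this rapidly evolving field.',
--                 'url': f'https://example.com/trends-{query.replace(" ", "-").lower()}-2024',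
--                 'source': 'Mock Search Result'
--             },
--             {
--                 'title': f'Practical Applications of {query.title()}',
--                 'snippet': f'Discover real-world applications of {query} across various industries. From healthcare to finance, see how {query} is transforming different sectors.',
--                 'url': f'https://example.com/applications-{query.replace(" ", "-").lower()}',
--                 'source': 'Mock Search Result'
--             }
--         ]
--     elif any(keyword in query_lower for keyword in tech_keywords):
--         mock_results = [
--             {
--                 'title': f'{query.title()}: Best Practices and Tips',
--                 'snippet': f'Master {query} with these expert tips and best practices. Learn from experienced professionals and improve your skills.',
--                 'url': f'https://example.com/best-practices-{query.replace(" ", "-").lower()}',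
--                 'source': 'Mock Search Result'
--             },
--             {
--                 'title': f'Getting Started with {query.title()}',
--                 'snippet': f'A beginner-friendly introduction to {query}. Step-by-step guide to help you get started with the fundamentals.',
--                 'url': f'https://example.com/getting-started-{query.replace(" ", "-").lower()}',
--                 'source': 'Mock Search Result'
--             }
--         ]
--     else:
--         # Generic mock results
--         mock_results = [
--             {
--                 'title': f'Everything You Need to Know About {query.title()}',
--                 'snippet': f'Comprehensive information about {query}. Find answers to your questions and learn more about this topic.',
--                 'url': f'https://example.com/about-{query.replace(" ", "-").lower()}',
--                 'source': 'Mock Search Result'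
--             },
--             {
--                 'title': f'{query.title()}: FAQ and Common Questions',
--                 'snippet': f'Frequently asked questions about {query}. Get quick answers to the most common queries related to this topic.',
--                 'url': f'https://example.com/faq-{query.replace(" ", "-").lower()}',
--                 'source': 'Mock Search Result'
--             }
--         ]
--
--     return mock_results[:3]  # Return top 3 mock results
-- ===== SOURCE B (Python) =====
-- # Table-driven rewrite: ordered (keywords, templates) table + generic fallback,
-- # one single-pass placeholder substitution instead of per-branch literal lists.
--
-- _AI_TEMPLATES = [
--     ('Understanding {t}: A Comprehensive Guide',
--      'Learn about {q} and its applications in modern technology. This comprehensive guide covers the fundamentals, applications, and future prospects of {q}.',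
--      'https://example.com/guide-to-{s}'),
--     ('{t} in 2024: Latest Trends and Developments',
--      'Explore the latest trends in {q}. Industry experts share insights about current developments and future directions in this rapidly evolving field.',
--      'https://example.com/trends-{s}-2024'),
--     ('Practical Applications of {t}',
--      'Discover real-world applications of {q} across various industries. From healthcare to finance, see how {q} is transforming different sectors.',
--      'https://example.com/applications-{s}'),
-- ]
--
-- _TECH_TEMPLATES = [
--     ('{t}: Best Practices and Tips',
--      'Master {q} with these expert tips and best practices. Learn from experienced professionals and improve your skills.',
--      'https://example.com/best-practices-{s}'),
--     ('Getting Started with {t}',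
--      'A beginner-friendly introduction to {q}. Step-by-step guide to help you get started with the fundamentals.',
--      'https://example.com/getting-started-{s}'),
-- ]
--
-- _GENERIC_TEMPLATES = [
--     ('Everything You Need to Know About {t}',
--      'Comprehensive information about {q}. Find answers to your questions and learn more about this topic.',
--      'https://example.com/about-{s}'),
--     ('{t}: FAQ and Common Questions',
--      'Frequently asked questions about {q}. Get quick answers to the most common queries related to this topic.',
--      'https://example.com/faq-{s}'),
-- ]
--
-- _CATEGORIES = [
--     (['ai', 'artificial intelligence', 'machine learning', 'deep learning', 'neural network'], _AI_TEMPLATES),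
--     (['programming', 'coding', 'software', 'development', 'computer'], _TECH_TEMPLATES),
-- ]
--
--
-- def _fill(tpl, env):
--     # single-pass substitution of '{x}' placeholders (safe even if the
--     # substituted values themselves contain '{x}')
--     out = []
--     i = 0
--     n = len(tpl)
--     while i < n:
--         if tpl[i] == '{' and i + 2 < n and tpl[i + 2] == '}':
--             out.append(env[tpl[i + 1]])
--             i += 3
--         else:
--             out.append(tpl[i])
--             i += 1
--     return ''.join(out)
--
--
-- def _pick_templates(query_lower):
--     for keywords, templates in _CATEGORIES:
--         if any(k in query_lower for k in keywords):
--             return templates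
--     return _GENERIC_TEMPLATES
--
--
-- def _row(env, tpl):
--     # one result row, instantiated from one (title, snippet, url) template triple
--     t, sn, u = tpl
--     return {'title': _fill(t, env), 'snippet': _fill(sn, env),
--             'url': _fill(u, env), 'source': 'Mock Search Result'}
--
--
-- def _get_mock_results(query):
--     env = {'q': query, 't': query.title(), 's': query.replace(' ', '-').lower()}
--     templates = _pick_templates(query.lower())
--     return [_row(env, tpl) for tpl in templates][:3]
-- ===== Notes on version B (the rewrite author's own statement) =====
-- stated objective: simpler
-- what changed: Replaces the if/elif/else with three inline literal result lists by an ordered (keywords, templates) table scanned for the first match plus one single-pass placeholder-substitution routine that instantiates the chosen templates.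
import Mathlib
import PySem

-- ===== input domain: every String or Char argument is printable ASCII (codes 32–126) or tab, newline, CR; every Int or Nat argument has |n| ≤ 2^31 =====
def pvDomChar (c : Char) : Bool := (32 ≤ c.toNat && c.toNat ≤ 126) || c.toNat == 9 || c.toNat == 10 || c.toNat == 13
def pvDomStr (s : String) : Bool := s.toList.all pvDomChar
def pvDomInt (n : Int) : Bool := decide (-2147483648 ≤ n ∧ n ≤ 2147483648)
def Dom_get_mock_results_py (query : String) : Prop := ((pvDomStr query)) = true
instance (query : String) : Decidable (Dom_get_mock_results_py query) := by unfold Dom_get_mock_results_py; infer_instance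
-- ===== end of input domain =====

-- B is a table-driven rewrite of A (ordered (keywords, templates) table, first match wins,
-- plus one single-pass placeholder substitution) — objective: simpler; return value only, no side effects.

-- ===== PORT A =====
-- str.title(), hand-ported (no PySem primitive): a letter after a non-letter is uppercased,
-- any other letter lowercased; exact for the ASCII domain, where the cased characters are exactly the letters.
def titleGo (prevAlpha : Bool) : List Char → List Char
  | [] => []
  | c :: rest =>
      if PySem.Chars.isalpha c then
        (if prevAlpha then PySem.Chars.lowerChar c else PySem.Chars.upperChar c) :: titleGo true rest
      else
        c :: titleGo false rest

def pyTitle (s : List Char) : List Char := titleGo false s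

def get_mock_results_py (query : String) : List (List (String × String)) :=
  let q : List Char := query.toList
  let ai_keywords : List (List Char) := [['a', 'i'], ['a', 'r', 't', 'i', 'f', 'i', 'c', 'i', 'a', 'l', ' ', 'i', 'n', 't', 'e', 'l', 'l', 'i', 'g', 'e', 'n', 'c', 'e'], ['m', 'a', 'c', 'h', 'i', 'n', 'e', ' ', 'l', 'e', 'a', 'r', 'n', 'i', 'n', 'g'], ['d', 'e', 'e', 'p', ' ', 'l', 'e', 'a', 'r', 'n', 'i', 'n', 'g'], ['n', 'e', 'u', 'r', 'a', 'l', ' ', 'n', 'e', 't', 'w', 'o', 'r', 'k']]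
  let tech_keywords : List (List Char) := [['p', 'r', 'o', 'g', 'r', 'a', 'm', 'm', 'i', 'n', 'g'], ['c', 'o', 'd', 'i', 'n', 'g'], ['s', 'o', 'f', 't', 'w', 'a', 'r', 'e'], ['d', 'e', 'v', 'e', 'l', 'o', 'p', 'm', 'e', 'n', 't'], ['c', 'o', 'm', 'p', 'u', 't', 'e', 'r']]
  -- science_keywords is defined in A but never used
  let _science_keywords : List (List Char) := [['s', 'c', 'i', 'e', 'n', 'c', 'e'], ['r', 'e', 's', 'e', 'a', 'r', 'c', 'h'], ['t', 'e', 'c', 'h', 'n', 'o', 'l', 'o', 'g', 'y'], ['i', 'n', 'n', 'o', 'v', 'a', 't', 'i', 'o', 'n']]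
  let query_lower : List Char := PySem.Chars.lower q
  let mock_results : List (List (String × String)) :=
    if ai_keywords.any (fun keyword => PySem.Chars.isIn keyword query_lower) then
[
        [ ("title", String.ofList ((['U', 'n', 'd', 'e', 'r', 's', 't', 'a', 'n', 'd', 'i', 'n', 'g', ' ']) ++ (pyTitle q) ++ ([':', ' ', 'A', ' ', 'C', 'o', 'm', 'p', 'r', 'e', 'h', 'e', 'n', 's', 'i', 'v', 'e', ' ', 'G', 'u', 'i', 'd', 'e']))),
          ("snippet", String.ofList ((['L', 'e', 'a', 'r', 'n', ' ', 'a', 'b', 'o', 'u', 't', ' ']) ++ q ++ ([' ', 'a', 'n', 'd', ' ', 'i', 't', 's', ' ', 'a', 'p', 'p', 'l', 'i', 'c', 'a', 't', 'i', 'o', 'n', 's', ' ', 'i', 'n', ' ', 'm', 'o', 'd', 'e', 'r', 'n', ' ', 't', 'e', 'c', 'h', 'n', 'o', 'l', 'o', 'g', 'y', '.', ' ', 'T', 'h', 'i', 's', ' ', 'c', 'o', 'm', 'p', 'r', 'e', 'h', 'e', 'n', 's', 'i', 'v', 'e', ' ', 'g', 'u', 'i', 'd', 'e', ' ', 'c',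 'o', 'v', 'e', 'r', 's', ' ', 't', 'h', 'e', ' ', 'f', 'u', 'n', 'd', 'a', 'm', 'e', 'n', 't', 'a', 'l', 's', ',', ' ', 'a', 'p', 'p', 'l', 'i', 'c', 'a', 't', 'i', 'o', 'n', 's', ',', ' ', 'a', 'n', 'd', ' ', 'f', 'u', 't', 'u', 'r', 'e', ' ', 'p', 'r', 'o', 's', 'p', 'e', 'c', 't', 's', ' ', 'o', 'f', ' ']) ++ q ++ ['.'])),
          ("url", String.ofList ((['h', 't', 't', 'p', 's', ':', '/', '/', 'e', 'x', 'a', 'm', 'p', 'l', 'e', '.', 'c', 'o', 'm', '/', 'g', 'u', 'i', 'd', 'e', '-', 't', 'o', '-']) ++ (PySem.Chars.lower (PySem.Chars.replace q [' '] ['-'])))),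
          ("source", "Mock Search Result") ],
        [ ("title", String.ofList ((pyTitle q) ++ ([' ', 'i', 'n', ' ', '2', '0', '2', '4', ':', ' ', 'L', 'a', 't', 'e', 's', 't', ' ', 'T', 'r', 'e', 'n', 'd', 's', ' ', 'a', 'n', 'd', ' ', 'D', 'e', 'v', 'e', 'l', 'o', 'p', 'm', 'e', 'n', 't', 's']))),
          ("snippet", String.ofList ((['E', 'x', 'p', 'l', 'o', 'r', 'e', ' ', 't', 'h', 'e', ' ', 'l', 'a', 't', 'e', 's', 't', ' ', 't', 'r', 'e', 'n', 'd', 's', ' ', 'i', 'n', ' ']) ++ q ++ (['.', ' ', 'I', 'n', 'd', 'u', 's', 't', 'r', 'y', ' ', 'e', 'x', 'p', 'e', 'r', 't', 's', ' ', 's', 'h', 'a', 'r', 'e', ' ', 'i', 'n', 's', 'i', 'g', 'h', 't', 's', ' ', 'a', 'b', 'o', 'u', 't', ' ', 'c', 'u', 'r', 'r', 'e', 'n', 't', ' ', 'd', 'e', 'v', 'e', 'l', 'o', 'p', 'm', 'e', 'n', 't', 's', ' ', 'a', 'n', 'd', ' ', 'f', 'u', 't', 'u', 'r', 'e', ' ',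 'd', 'i', 'r', 'e', 'c', 't', 'i', 'o', 'n', 's', ' ', 'i', 'n', ' ', 't', 'h', 'i', 's', ' ', 'r', 'a', 'p', 'i', 'd', 'l', 'y', ' ', 'e', 'v', 'o', 'l', 'v', 'i', 'n', 'g', ' ', 'f', 'i', 'e', 'l', 'd', '.']))),
          ("url", String.ofList ((['h', 't', 't', 'p', 's', ':', '/', '/', 'e', 'x', 'a', 'm', 'p', 'l', 'e', '.', 'c', 'o', 'm', '/', 't', 'r', 'e', 'n', 'd', 's', '-']) ++ (PySem.Chars.lower (PySem.Chars.replace q [' '] ['-'])) ++ (['-', '2', '0', '2', '4']))),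
          ("source", "Mock Search Result") ],
        [ ("title", String.ofList ((['P', 'r', 'a', 'c', 't', 'i', 'c', 'a', 'l', ' ', 'A', 'p', 'p', 'l', 'i', 'c', 'a', 't', 'i', 'o', 'n', 's', ' ', 'o', 'f', ' ']) ++ (pyTitle q))),
          ("snippet", String.ofList ((['D', 'i', 's', 'c', 'o', 'v', 'e', 'r', ' ', 'r', 'e', 'a', 'l', '-', 'w', 'o', 'r', 'l', 'd', ' ', 'a', 'p', 'p', 'l', 'i', 'c', 'a', 't', 'i', 'o', 'n', 's', ' ', 'o', 'f', ' ']) ++ q ++ ([' ', 'a', 'c', 'r', 'o', 's', 's', ' ', 'v', 'a', 'r', 'i', 'o', 'u', 's', ' ', 'i', 'n', 'd', 'u', 's', 't', 'r', 'i', 'e', 's', '.', ' ', 'F', 'r', 'o', 'm', ' ', 'h', 'e', 'a', 'l', 't', 'h', 'c', 'a', 'r', 'e', ' ', 't', 'o', ' ', 'f', 'i', 'n', 'a', 'n', 'c', 'e', ',', ' ', 's', 'e', 'e', ' ', 'h', 'o', 'w', ' ']) ++ q ++ ([' ', 'i', 's', ' ', 't', 'r', 'a', 'n', 's', 'f', 'o',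 'r', 'm', 'i', 'n', 'g', ' ', 'd', 'i', 'f', 'f', 'e', 'r', 'e', 'n', 't', ' ', 's', 'e', 'c', 't', 'o', 'r', 's', '.']))),
          ("url", String.ofList ((['h', 't', 't', 'p', 's', ':', '/', '/', 'e', 'x', 'a', 'm', 'p', 'l', 'e', '.', 'c', 'o', 'm', '/', 'a', 'p', 'p', 'l', 'i', 'c', 'a', 't', 'i', 'o', 'n', 's', '-']) ++ (PySem.Chars.lower (PySem.Chars.replace q [' '] ['-'])))),
          ("source", "Mock Search Result") ] ]
    else if tech_keywords.any (fun keyword => PySem.Chars.isIn keyword query_lower) then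
[
        [ ("title", String.ofList ((pyTitle q) ++ ([':', ' ', 'B', 'e', 's', 't', ' ', 'P', 'r', 'a', 'c', 't', 'i', 'c', 'e', 's', ' ', 'a', 'n', 'd', ' ', 'T', 'i', 'p', 's']))),
          ("snippet", String.ofList ((['M', 'a', 's', 't', 'e', 'r', ' ']) ++ q ++ ([' ', 'w', 'i', 't', 'h', ' ', 't', 'h', 'e', 's', 'e', ' ', 'e', 'x', 'p', 'e', 'r', 't', ' ', 't', 'i', 'p', 's', ' ', 'a', 'n', 'd', ' ', 'b', 'e', 's', 't', ' ', 'p', 'r', 'a', 'c', 't', 'i', 'c', 'e', 's', '.', ' ', 'L', 'e', 'a', 'r', 'n', ' ', 'f', 'r', 'o', 'm', ' ', 'e', 'x', 'p', 'e', 'r', 'i', 'e', 'n', 'c', 'e', 'd', ' ', 'p', 'r', 'o', 'f', 'e', 's', 's', 'i', 'o', 'n', 'a', 'l', 's', ' ', 'a', 'n', 'd', ' ', 'i', 'm', 'p', 'r', 'o', 'v', 'e', ' ', 'y', 'o', 'u', 'r', ' ', 's', 'k', 'i', 'l', 'l', 's', '.']))),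
          ("url", String.ofList ((['h', 't', 't', 'p', 's', ':', '/', '/', 'e', 'x', 'a', 'm', 'p', 'l', 'e', '.', 'c', 'o', 'm', '/', 'b', 'e', 's', 't', '-', 'p', 'r', 'a', 'c', 't', 'i', 'c', 'e', 's', '-']) ++ (PySem.Chars.lower (PySem.Chars.replace q [' '] ['-'])))),
          ("source", "Mock Search Result") ],
        [ ("title", String.ofList ((['G', 'e', 't', 't', 'i', 'n', 'g', ' ', 'S', 't', 'a', 'r', 't', 'e', 'd', ' ', 'w', 'i', 't', 'h', ' ']) ++ (pyTitle q))),
          ("snippet", String.ofList ((['A', ' ', 'b', 'e', 'g', 'i', 'n', 'n', 'e', 'r', '-', 'f', 'r', 'i', 'e', 'n', 'd', 'l', 'y', ' ', 'i', 'n', 't', 'r', 'o', 'd', 'u', 'c', 't', 'i', 'o', 'n', ' ', 't', 'o', ' ']) ++ q ++ (['.', ' ', 'S', 't', 'e', 'p', '-', 'b', 'y', '-', 's', 't', 'e', 'p', ' ', 'g', 'u', 'i', 'd', 'e', ' ', 't', 'o', ' ', 'h', 'e', 'l', 'p', ' ', 'y', 'o', 'u', ' ', 'g', 'e', 't', ' ',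 's', 't', 'a', 'r', 't', 'e', 'd', ' ', 'w', 'i', 't', 'h', ' ', 't', 'h', 'e', ' ', 'f', 'u', 'n', 'd', 'a', 'm', 'e', 'n', 't', 'a', 'l', 's', '.']))),
          ("url", String.ofList ((['h', 't', 't', 'p', 's', ':', '/', '/', 'e', 'x', 'a', 'm', 'p', 'l', 'e', '.', 'c', 'o', 'm', '/', 'g', 'e', 't', 't', 'i', 'n', 'g', '-', 's', 't', 'a', 'r', 't', 'e', 'd', '-']) ++ (PySem.Chars.lower (PySem.Chars.replace q [' '] ['-'])))),
          ("source", "Mock Search Result") ] ]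
    else
[
        [ ("title", String.ofList ((['E', 'v', 'e', 'r', 'y', 't', 'h', 'i', 'n', 'g', ' ', 'Y', 'o', 'u', ' ', 'N', 'e', 'e', 'd', ' ', 't', 'o', ' ', 'K', 'n', 'o', 'w', ' ', 'A', 'b', 'o', 'u', 't', ' ']) ++ (pyTitle q))),
          ("snippet", String.ofList ((['C', 'o', 'm', 'p', 'r', 'e', 'h', 'e', 'n', 's', 'i', 'v', 'e', ' ', 'i', 'n', 'f', 'o', 'r', 'm', 'a', 't', 'i', 'o', 'n', ' ', 'a', 'b', 'o', 'u', 't', ' ']) ++ q ++ (['.', ' ', 'F', 'i', 'n', 'd', ' ', 'a', 'n', 's', 'w', 'e', 'r', 's', ' ', 't', 'o', ' ', 'y', 'o', 'u', 'r', ' ', 'q', 'u', 'e', 's', 't', 'i', 'o', 'n', 's', ' ', 'a', 'n', 'd', ' ', 'l', 'e', 'a', 'r', 'n', ' ', 'm', 'o', 'r', 'e', ' ', 'a', 'b', 'o', 'u', 't', ' ', 't', 'h', 'i', 's', ' ', 't', 'o', 'p', 'i', 'c', '.']))),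
          ("url", String.ofList ((['h', 't', 't', 'p', 's', ':', '/', '/', 'e', 'x', 'a', 'm', 'p', 'l', 'e', '.', 'c', 'o', 'm', '/', 'a', 'b', 'o', 'u', 't', '-']) ++ (PySem.Chars.lower (PySem.Chars.replace q [' '] ['-'])))),
          ("source", "Mock Search Result") ],
        [ ("title", String.ofList ((pyTitle q) ++ ([':', ' ', 'F', 'A', 'Q', ' ', 'a', 'n', 'd', ' ', 'C', 'o', 'm', 'm', 'o', 'n', ' ', 'Q', 'u', 'e', 's', 't', 'i', 'o', 'n', 's']))),
          ("snippet", String.ofList ((['F', 'r', 'e', 'q', 'u', 'e', 'n', 't', 'l', 'y', ' ', 'a', 's', 'k', 'e', 'd', ' ', 'q', 'u', 'e', 's', 't', 'i', 'o', 'n', 's', ' ', 'a', 'b', 'o', 'u', 't', ' ']) ++ q ++ (['.', ' ', 'G', 'e', 't', ' ', 'q', 'u', 'i', 'c', 'k', ' ', 'a', 'n', 's', 'w', 'e', 'r', 's', ' ', 't', 'o', ' ', 't', 'h', 'e', ' ', 'm', 'o', 's', 't', ' ', 'c', 'o', 'm', 'm', 'o', 'n', ' ', 'q', 'u', 'e',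 'r', 'i', 'e', 's', ' ', 'r', 'e', 'l', 'a', 't', 'e', 'd', ' ', 't', 'o', ' ', 't', 'h', 'i', 's', ' ', 't', 'o', 'p', 'i', 'c', '.']))),
          ("url", String.ofList ((['h', 't', 't', 'p', 's', ':', '/', '/', 'e', 'x', 'a', 'm', 'p', 'l', 'e', '.', 'c', 'o', 'm', '/', 'f', 'a', 'q', '-']) ++ (PySem.Chars.lower (PySem.Chars.replace q [' '] ['-'])))),
          ("source", "Mock Search Result") ] ]
  PySem.List.slice mock_results none (some 3)

-- ===== PORT B =====
-- Source B's template tables, kept as the string literals they are in Source B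
def pvAiTemplates : List (String × String × String) :=
  [ ("Understanding {t}: A Comprehensive Guide",
     "Learn about {q} and its applications in modern technology. This comprehensive guide covers the fundamentals, applications, and future prospects of {q}.",
     "https://example.com/guide-to-{s}"),
    ("{t} in 2024: Latest Trends and Developments",
     "Explore the latest trends in {q}. Industry experts share insights about current developments and future directions in this rapidly evolving field.",
     "https://example.com/trends-{s}-2024"),
    ("Practical Applications of {t}",
     "Discover real-world applications of {q} across various industries. From healthcare to finance, see how {q} is transforming different sectors.",
     "https://example.com/applications-{s}") ]

def pvTechTemplates : List (String × String × String) :=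
  [ ("{t}: Best Practices and Tips",
     "Master {q} with these expert tips and best practices. Learn from experienced professionals and improve your skills.",
     "https://example.com/best-practices-{s}"),
    ("Getting Started with {t}",
     "A beginner-friendly introduction to {q}. Step-by-step guide to help you get started with the fundamentals.",
     "https://example.com/getting-started-{s}") ]

def pvGenericTemplates : List (String × String × String) :=
  [ ("Everything You Need to Know About {t}",
     "Comprehensive information about {q}. Find answers to your questions and learn more about this topic.",
     "https://example.com/about-{s}"),
    ("{t}: FAQ and Common Questions",
     "Frequently asked questions about {q}. Get quick answers to the most common queries related to this topic.",
     "https://example.com/faq-{s}") ]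

def pvCategories : List (List String × List (String × String × String)) :=
  [ (["ai", "artificial intelligence", "machine learning", "deep learning", "neural network"], pvAiTemplates),
    (["programming", "coding", "software", "development", "computer"], pvTechTemplates) ]

-- _fill: single-pass '{x}' substitution; env[k] is a dict lookup that raises on a missing key in
-- Python — ported as getD with [] (never reached: every placeholder of the constant templates is a key).
def pvFill (env : PySem.Dict Char (List Char)) : List Char → List Char
  | [] => []
  | '{' :: k :: '}' :: rest => (env.getD k []) ++ pvFill env rest
  | c :: rest => c :: pvFill env rest

def pvPickTemplates (query_lower : List Char) :
    List (List String × List (String × String × String)) → List (String × String × String)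
  | [] => pvGenericTemplates
  | (keywords, templates) :: rest =>
      if keywords.any (fun k => PySem.Chars.isIn k.toList query_lower) then templates
      else pvPickTemplates query_lower rest

-- one result row (the dict built by Source B's comprehension for one template triple)
def pvRow (env : PySem.Dict Char (List Char)) (tpl : String × String × String) :
    List (String × String) :=
  [ ("title", String.ofList (pvFill env tpl.1.toList)),
    ("snippet", String.ofList (pvFill env tpl.2.1.toList)),
    ("url", String.ofList (pvFill env tpl.2.2.toList)),
    ("source", "Mock Search Result") ]

def get_mock_results_py_alt (query : String) : List (List (String × String)) :=
  let env : PySem.Dict Char (List Char) :=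
    PySem.Dict.ofList [('q', query.toList), ('t', pyTitle query.toList),
                       ('s', PySem.Chars.lower (PySem.Chars.replace query.toList [' '] ['-']))]
  let templates : List (String × String × String) :=
    pvPickTemplates (PySem.Chars.lower query.toList) pvCategories
  PySem.List.slice (templates.map (pvRow env)) none (some 3)

-- ===== PRECONDITION & SPEC =====
def Spec_get_mock_results_py (query : String) (out : List (List (String × String))) : Prop := out = get_mock_results_py_alt query
instance (query : String) (out : List (List (String × String))) : Decidable (Spec_get_mock_results_py query out) := by unfold Spec_get_mock_results_py; infer_instance

-- ===== CLAIM (what is proved, stated in full; the proofs are below) =====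
def Claim_equal_get_mock_results_py : Prop := ∀ (query : String), Dom_get_mock_results_py query → Spec_get_mock_results_py query (get_mock_results_py query)

-- ===== LEMMAS AND PROOFS =====

-- ===== VERDICT (by name: the statement is the Claim_ definition above) =====
set_option maxRecDepth 100000 in
set_option maxHeartbeats 4000000 in
theorem get_mock_results_py_spec : Claim_equal_get_mock_results_py := by
  intro query _
  show get_mock_results_py query = get_mock_results_py_alt query
  unfold get_mock_results_py get_mock_results_py_alt
  simp only [pvCategories, pvPickTemplates]
  by_cases hai : (([['a', 'i'], ['a', 'r', 't', 'i', 'f', 'i', 'c', 'i', 'a', 'l', ' ', 'i', 'n', 't', 'e', 'l', 'l', 'i', 'g', 'e', 'n', 'c', 'e'], ['m', 'a', 'c', 'h', 'i', 'n', 'e', ' ', 'l', 'e', 'a', 'r', 'n', 'i', 'n', 'g'], ['d', 'e', 'e', 'p', ' ', 'l', 'e', 'a', 'r', 'n', 'i', 'n', 'g'], ['n', 'e', 'u', 'r', 'a', 'l', ' ', 'n', 'e', 't', 'w', 'o', 'r', 'k']] : List (List Char)).any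
      (fun keyword => PySem.Chars.isIn keyword (PySem.Chars.lower query.toList))) = true
  · have hb : ((["ai", "artificial intelligence", "machine learning", "deep learning", "neural network"] : List String).any
        (fun k => PySem.Chars.isIn k.toList (PySem.Chars.lower query.toList))) = true := hai
    rw [if_pos hai, if_pos hb]
    simp only [pvAiTemplates, pvRow, List.map_cons, List.map_nil]
    rw [show (3:Int) = ((3:Nat):Int) from rfl, PySem.List.slice_to_natCast,
      PySem.List.slice_to_natCast, List.take_of_length_le (by simp),
      List.take_of_length_le (by simp)]
    simp only [List.cons.injEq, Prod.mk.injEq, and_true, true_and]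
    and_intros <;> (first | rfl | (simp [pvFill] <;> rfl))
  · have hb : ¬ ((["ai", "artificial intelligence", "machine learning", "deep learning", "neural network"] : List String).any
        (fun k => PySem.Chars.isIn k.toList (PySem.Chars.lower query.toList))) = true := hai
    rw [if_neg hai, if_neg hb]
    by_cases htech : (([['p', 'r', 'o', 'g', 'r', 'a', 'm', 'm', 'i', 'n', 'g'], ['c', 'o', 'd', 'i', 'n', 'g'], ['s', 'o', 'f', 't', 'w', 'a', 'r', 'e'], ['d', 'e', 'v', 'e', 'l', 'o', 'p', 'm', 'e', 'n', 't'], ['c', 'o', 'm', 'p', 'u', 't', 'e', 'r']] : List (List Char)).any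
        (fun keyword => PySem.Chars.isIn keyword (PySem.Chars.lower query.toList))) = true
    · have htb : ((["programming", "coding", "software", "development", "computer"] : List String).any
          (fun k => PySem.Chars.isIn k.toList (PySem.Chars.lower query.toList))) = true := htech
      rw [if_pos htech, if_pos htb]
      simp only [pvTechTemplates, pvRow, List.map_cons, List.map_nil]
      rw [show (3:Int) = ((3:Nat):Int) from rfl, PySem.List.slice_to_natCast,
        PySem.List.slice_to_natCast, List.take_of_length_le (by simp),
        List.take_of_length_le (by simp)]
      simp only [List.cons.injEq, Prod.mk.injEq, and_true, true_and]
      and_intros <;> (first | rfl | (simp [pvFill] <;> rfl))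
    · have htb : ¬ ((["programming", "coding", "software", "development", "computer"] : List String).any
          (fun k => PySem.Chars.isIn k.toList (PySem.Chars.lower query.toList))) = true := htech
      rw [if_neg htech, if_neg htb]
      simp only [pvGenericTemplates, pvRow, List.map_cons, List.map_nil]
      rw [show (3:Int) = ((3:Nat):Int) from rfl, PySem.List.slice_to_natCast,
        PySem.List.slice_to_natCast, List.take_of_length_le (by simp),
        List.take_of_length_le (by simp)]
      simp only [List.cons.injEq, Prod.mk.injEq, and_true, true_and]
      and_intros <;> (first | rfl | (simp [pvFill] <;> rfl))
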